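-- pv_equiv track=rewrite | github.com/SashaPasha280kgtyaga/Task-2 | Screenshot_7.py | button_press
-- ===== SOURCE A (Python) =====
-- def button_press(message):
--     button_presses = ""
--     for char in message:
--         if char.lower() == 'a':
--             button_presses += '1'
--         elif char.lower() == 'e':
--             button_presses += '55555'
--         elif char.lower() == 'g':
--             button_presses += '7777777'
--         else:
--             pass
--     return button_presses
-- ===== SOURCE B (Python) =====
-- def button_press(message):
--     kept = ''.join(filter('aeg'.__contains__, message.lower()))
--     return kept.replace('a', '1').replace('e', '55555').replace('g', '7777777')
-- ===== Notes on version B (the rewrite author's own statement) =====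
-- stated objective: alternative
-- what changed: Replaces the per-character if/elif dispatch with an accumulator by three staged whole-string passes: lower-case, filter to the mapped letters, then chained str.replace calls that expand each letter globally.
import Mathlib
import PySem

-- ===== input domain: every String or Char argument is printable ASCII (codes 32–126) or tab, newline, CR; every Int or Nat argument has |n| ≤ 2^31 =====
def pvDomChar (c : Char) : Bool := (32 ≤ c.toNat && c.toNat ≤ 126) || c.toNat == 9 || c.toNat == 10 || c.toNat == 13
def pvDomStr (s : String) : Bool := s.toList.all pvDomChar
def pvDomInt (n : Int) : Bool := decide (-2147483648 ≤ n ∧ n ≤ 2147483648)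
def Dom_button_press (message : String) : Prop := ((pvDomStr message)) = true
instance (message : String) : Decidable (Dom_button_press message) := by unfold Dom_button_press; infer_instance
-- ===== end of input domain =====

-- B replaces A's per-character if/elif cascade and accumulator by three staged
-- whole-string passes: lower-case, filter to 'aeg', then chained global replaces
-- (alternative decomposition; same O(n) cost).


-- ===== PORT A =====
-- literal transliteration: loop over chars, if/elif cascade, accumulator string
def button_press (message : String) : String :=
  message.toList.foldl
    (fun button_presses char =>
      if PySem.Chars.lowerChar char = 'a' then button_presses ++ "1"
      else if PySem.Chars.lowerChar char = 'e' then button_presses ++ "55555"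
      else if PySem.Chars.lowerChar char = 'g' then button_presses ++ "7777777"
      else button_presses)
    ""

-- ===== PORT B =====
-- Source B: kept = ''.join(filter('aeg'.__contains__, message.lower()));
--       return kept.replace('a','1').replace('e','55555').replace('g','7777777')
def button_press_alt (message : String) : String :=
  let kept : String :=
    String.ofList ((PySem.Str.lower message).toList.filter
      (fun ch => PySem.Chars.isIn [ch] "aeg".toList))
  PySem.Str.replace
    (PySem.Str.replace (PySem.Str.replace kept "a" "1") "e" "55555")
    "g" "7777777"

-- ===== PRECONDITION & SPEC =====
def Spec_button_press (message : String) (out : String) : Prop := out = button_press_alt message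
instance (message : String) (out : String) : Decidable (Spec_button_press message out) := by unfold Spec_button_press; infer_instance

-- ===== CLAIM (what is proved, stated in full; the proofs are below) =====
def Claim_equal_button_press : Prop := ∀ (message : String), Dom_button_press message → Spec_button_press message (button_press message)

-- ===== LEMMAS AND PROOFS =====

-- replace with a single-char pattern is a flatMap over the characters
theorem replace_go_singleton (a : Char) (new : List Char) :
    ∀ (l : List Char) (fuel : Nat) (acc : List Char), l.length ≤ fuel →
      PySem.Chars.replace.go [a] new fuel l acc =
        acc.reverse ++ l.flatMap (fun c => if c = a then new else [c]) := by
  intro l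
  induction l with
  | nil => intro fuel acc _; cases fuel <;> simp [PySem.Chars.replace.go]
  | cons c t ih =>
      intro fuel acc h
      cases fuel with
      | zero => simp at h
      | succ f =>
          simp only [PySem.Chars.replace.go]
          by_cases hc : c = a
          · subst hc
            have hp : [c].isPrefixOf (c :: t) = true := by simp [List.isPrefixOf]
            rw [if_pos hp]
            simp only [List.length_singleton, List.drop_one, List.tail_cons]
            rw [ih f _ (by simpa using h)]
            simp
          · have hp : [a].isPrefixOf (c :: t) = false := by
              simp [List.isPrefixOf]; exact fun h' => absurd h'.symm hc
            rw [if_neg (by simp [hp])]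
            rw [ih f _ (by simpa using h)]
            simp [hc]

theorem replace_singleton (l : List Char) (a : Char) (new : List Char) :
    PySem.Chars.replace l [a] new = l.flatMap (fun c => if c = a then new else [c]) := by
  rw [PySem.Chars.replace]
  simp only [List.isEmpty_cons]
  rw [replace_go_singleton a new l l.length [] le_rfl]
  simp

-- membership test 'c in "aeg"'
theorem isIn_aeg (c : Char) :
    PySem.Chars.isIn [c] "aeg".toList = (c == 'a' || c == 'e' || c == 'g') := by
  rw [show ("aeg" : String).toList = ['a', 'e', 'g'] from rfl]
  by_cases h : c = 'a' ∨ c = 'e' ∨ c = 'g'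
  · rcases h with h | h | h <;> subst h <;> decide
  · push Not at h
    obtain ⟨h1, h2, h3⟩ := h
    have hninf : ¬ ([c] <:+: ['a', 'e', 'g']) := by
      intro hinf
      have hm := hinf.subset (show c ∈ [c] by simp)
      simp at hm
      rcases hm with h | h | h <;> [exact h1 h; exact h2 h; exact h3 h]
    have hf := (PySem.Chars.isIn_eq_false_iff [c] ['a', 'e', 'g']).mpr hninf
    simp [hf, h1, h2, h3]

-- per-character mapping on an already-lowercased char
def pvMapL (c : Char) : List Char :=
  if c = 'a' then "1".toList
  else if c = 'e' then "55555".toList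
  else if c = 'g' then "7777777".toList
  else []

-- A's fold, on the list side
theorem foldA_eq (l : List Char) (acc : String) :
    (l.foldl
      (fun button_presses char =>
        if PySem.Chars.lowerChar char = 'a' then button_presses ++ "1"
        else if PySem.Chars.lowerChar char = 'e' then button_presses ++ "55555"
        else if PySem.Chars.lowerChar char = 'g' then button_presses ++ "7777777"
        else button_presses)
      acc).toList = acc.toList ++ l.flatMap (fun c => pvMapL (PySem.Chars.lowerChar c)) := by
  induction l generalizing acc with
  | nil => simp
  | cons c t ih =>
      simp only [List.foldl_cons, List.flatMap_cons]
      rw [ih]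
      unfold pvMapL
      split_ifs <;> simp

-- B's chain of single-char replaces over the filtered list, as one flatMap
theorem chainB_eq (l : List Char) :
    (((l.filter (fun ch => PySem.Chars.isIn [ch] "aeg".toList)).flatMap
        (fun c => if c = 'a' then "1".toList else [c])).flatMap
          (fun c => if c = 'e' then "55555".toList else [c])).flatMap
            (fun c => if c = 'g' then "7777777".toList else [c])
      = l.flatMap pvMapL := by
  induction l with
  | nil => simp
  | cons c t ih =>
      simp only [List.filter_cons, List.flatMap_cons]
      by_cases hc : PySem.Chars.isIn [c] "aeg".toList = true
      · rw [if_pos hc]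
        simp only [List.flatMap_cons, List.flatMap_append]
        rw [ih]
        have h := isIn_aeg c
        rw [hc] at h
        have hmem : c = 'a' ∨ c = 'e' ∨ c = 'g' := by
          rcases Bool.or_eq_true_iff.mp h.symm with h' | h'
          · rcases Bool.or_eq_true_iff.mp h' with h'' | h''
            · exact Or.inl (by simpa using h'')
            · exact Or.inr (Or.inl (by simpa using h''))
          · exact Or.inr (Or.inr (by simpa using h'))
        rcases hmem with h' | h' | h' <;> subst h' <;> simp [pvMapL]
      · rw [if_neg hc]
        rw [ih]
        have h := isIn_aeg c
        rw [eq_false_of_ne_true hc] at h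
        have h1 : ¬ c = 'a' := fun h' => by subst h'; simp at h
        have h2 : ¬ c = 'e' := fun h' => by subst h'; simp at h
        have h3 : ¬ c = 'g' := fun h' => by subst h'; simp at h
        simp [pvMapL, h1, h2, h3]

-- ===== VERDICT (by name: the statement is the Claim_ definition above) =====
set_option maxHeartbeats 1000000 in
theorem button_press_spec : Claim_equal_button_press := by
  intro message _
  unfold Spec_button_press button_press button_press_alt
  apply String.toList_inj.mp
  rw [foldA_eq]
  simp only [PySem.Str.toList_replace]
  rw [show ("a" : String).toList = ['a'] from rfl,
      show ("e" : String).toList = ['e'] from rfl,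
      show ("g" : String).toList = ['g'] from rfl]
  rw [replace_singleton, replace_singleton, replace_singleton]
  simp only [String.toList_ofList, PySem.Str.toList_lower]
  rw [chainB_eq]
  simp [PySem.Chars.lower, List.flatMap_map]
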